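-- pv_equiv track=rewrite | github.com/GrinRus/ai_driven_dev | hooks/context_gc/pretooluse_guard.py | _command_has_guard_segment
-- ===== SOURCE A (Python) =====
-- def _command_has_guard_segment(command: str, segments: list[str]) -> bool:
--     lowered = command.lower()
--     for segment in segments:
--         seg = segment.lower().strip("/\\")
--         if not seg:
--             continue
--         if f"/{seg}/" in lowered or f"{seg}/" in lowered or f"{seg}\\" in lowered:
--             return True
--     return False
-- ===== SOURCE B (Python) =====
-- def _command_has_guard_segment(command: str, segments: list[str]) -> bool:
--     # One pass over the lowered command: at each separator position, hash-look-up
--     # the preceding slice (for each distinct segment length) in a set of segments.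
--     segs = set()
--     for s in segments:
--         t = s.lower().strip("/\\")
--         if t:
--             segs.add(t)
--     if not segs:
--         return False
--     lengths = {len(t) for t in segs}
--     lc = command.lower()
--     for i, ch in enumerate(lc):
--         if ch == "/" or ch == "\\":
--             for n in lengths:
--                 if n <= i and lc[i - n : i] in segs:
--                     return True
--     return False
-- ===== Notes on version B (the rewrite author's own statement) =====
-- stated objective: faster
-- what changed: Instead of scanning the whole command once per segment with three substring searches, B builds a hash set of the normalized segments (and the set of their distinct lengths) once and makes a single pass over the lowered command, hash-looking-up the slice preceding each '/' or '\' position.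
import Mathlib
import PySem

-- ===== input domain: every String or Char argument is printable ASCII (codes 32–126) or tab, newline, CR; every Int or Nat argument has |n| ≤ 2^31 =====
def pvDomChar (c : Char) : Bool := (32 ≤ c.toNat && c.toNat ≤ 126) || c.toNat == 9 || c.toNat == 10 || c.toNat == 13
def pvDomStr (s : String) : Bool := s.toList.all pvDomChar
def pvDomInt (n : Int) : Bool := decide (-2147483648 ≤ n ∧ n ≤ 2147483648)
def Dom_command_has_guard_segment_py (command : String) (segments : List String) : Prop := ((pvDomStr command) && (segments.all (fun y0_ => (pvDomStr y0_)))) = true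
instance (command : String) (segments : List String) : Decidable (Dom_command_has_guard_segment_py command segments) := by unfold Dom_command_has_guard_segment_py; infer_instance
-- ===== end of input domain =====

-- B replaces A's per-segment substring scans by one pass over the lowered command with
-- hash-set lookups of the slice before each separator (same results; measured faster in a timing run).


-- ===== PORT A =====
def command_has_guard_segment_py (command : String) (segments : List String) : Bool :=
  let lowered := PySem.Chars.lower command.toList
  -- for segment in segments: … return True / fall through to return False  =  List.any
  segments.any (fun segment =>
    let seg := PySem.Chars.stripChars (PySem.Chars.lower segment.toList) ['/', '\\']
    if seg = [] then false  -- continue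
    else PySem.Chars.isIn (['/'] ++ seg ++ ['/']) lowered
      || PySem.Chars.isIn (seg ++ ['/']) lowered
      || PySem.Chars.isIn (seg ++ ['\\']) lowered)

-- ===== PORT B =====
-- t = s.lower().strip("/\\")
def pvStripSeg (s : String) : List Char :=
  PySem.Chars.stripChars (PySem.Chars.lower s.toList) ['/', '\\']

def command_has_guard_segment_py_alt (command : String) (segments : List String) : Bool :=
  let segs : PySem.Set (List Char) :=
    segments.foldl (fun st s =>
      let t := pvStripSeg s
      if t ≠ [] then PySem.Set.add st t else st) PySem.Set.empty
  if segs = [] then false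
  else
    let lengths : PySem.Set Nat := PySem.Set.ofList (segs.map List.length)
    let lc := PySem.Chars.lower command.toList
    -- for i, ch in enumerate(lc): index loop over the positions of lc;
    -- lc[i - n : i] with n ≤ i < len lc is exactly (lc.drop (i - n)).take n
    (List.range lc.length).any (fun i =>
      if lc.getD i ' ' = '/' || lc.getD i ' ' = '\\' then
        lengths.any (fun n => decide (n ≤ i) && PySem.Set.contains segs ((lc.drop (i - n)).take n))
      else false)

-- ===== PRECONDITION & SPEC =====
def Spec_command_has_guard_segment_py (command : String) (segments : List String) (out : Bool) : Prop := out = command_has_guard_segment_py_alt command segments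
instance (command : String) (segments : List String) (out : Bool) : Decidable (Spec_command_has_guard_segment_py command segments out) := by unfold Spec_command_has_guard_segment_py; infer_instance

-- ===== CLAIM (what is proved, stated in full; the proofs are below) =====
def Claim_equal_command_has_guard_segment_py : Prop := ∀ (command : String) (segments : List String), Dom_command_has_guard_segment_py command segments → Spec_command_has_guard_segment_py command segments (command_has_guard_segment_py command segments)

-- ===== LEMMAS AND PROOFS =====

-- Both programs decide this property: some segment, normalized, is nonempty and occurs in the
-- lowered command immediately followed by a separator.
def GuardHit (command : String) (segments : List String) : Prop :=
  ∃ s ∈ segments, pvStripSeg s ≠ [] ∧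
    ((pvStripSeg s ++ ['/']) <:+: PySem.Chars.lower command.toList ∨
     (pvStripSeg s ++ ['\\']) <:+: PySem.Chars.lower command.toList)

-- membership in B's accumulated set of normalized segments
lemma mem_segs_foldl (l : List String) (st : PySem.Set (List Char)) (t : List Char) :
    (t ∈ l.foldl (fun st s => if pvStripSeg s ≠ [] then PySem.Set.add st (pvStripSeg s) else st) st
      ↔ t ∈ st ∨ ∃ s ∈ l, pvStripSeg s = t ∧ t ≠ []) := by
  induction l generalizing st with
  | nil => simp
  | cons a l ih =>
    simp only [List.foldl_cons, ih]
    by_cases h : pvStripSeg a = []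
    · simp only [h, ne_eq, not_true_eq_false, if_false, List.mem_cons]
      constructor
      · rintro (h1 | h1)
        · exact Or.inl h1
        · exact Or.inr (by rcases h1 with ⟨s, hs, h2, h3⟩; exact ⟨s, Or.inr hs, h2, h3⟩)
      · rintro (h1 | ⟨s, (rfl | hs), h2, h3⟩)
        · exact Or.inl h1
        · exact absurd (h2.symm.trans h) h3
        · exact Or.inr ⟨s, hs, h2, h3⟩
    · simp only [ne_eq, h, not_false_eq_true, if_true, PySem.Set.mem_add, List.mem_cons]
      constructor
      · rintro ((h1 | h1) | h1)
        · exact Or.inl h1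
        · exact Or.inr ⟨a, Or.inl rfl, h1.symm, h1 ▸ h⟩
        · exact Or.inr (by rcases h1 with ⟨s, hs, h2, h3⟩; exact ⟨s, Or.inr hs, h2, h3⟩)
      · rintro (h1 | ⟨s, (rfl | hs), h2, h3⟩)
        · exact Or.inl (Or.inl h1)
        · exact Or.inl (Or.inr h2.symm)
        · exact Or.inr ⟨s, hs, h2, h3⟩

-- "seg followed by c" occurs in xs iff some position i carries c with seg ending just before it
lemma infix_snoc_iff (seg : List Char) (c : Char) (xs : List Char) :
    (seg ++ [c]) <:+: xs ↔
      ∃ i, i < xs.length ∧ xs.getD i ' ' = c ∧ seg.length ≤ i ∧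
        (xs.drop (i - seg.length)).take seg.length = seg := by
  constructor
  · rintro ⟨pre, post, rfl⟩
    have hre : pre ++ (seg ++ [c]) ++ post = (pre ++ seg) ++ c :: post := by simp
    refine ⟨pre.length + seg.length, ?_, ?_, by omega, ?_⟩
    · simp
    · rw [hre, List.getD_eq_getElem?_getD,
        List.getElem?_append_right (by simp : (pre ++ seg).length ≤ pre.length + seg.length)]
      simp
    · have h1 : pre.length + seg.length - seg.length = pre.length := by omega
      rw [h1, List.append_assoc, List.drop_left, List.append_assoc, List.take_left]
  · rintro ⟨i, hi, hc, hn, ht⟩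
    have hdrop : xs.drop (i - seg.length) = seg ++ xs.drop i := by
      conv_lhs => rw [← List.take_append_drop seg.length (xs.drop (i - seg.length))]
      rw [ht, List.drop_drop]
      congr 2
      omega
    have hgl : xs.drop i = c :: xs.drop (i + 1) := by
      rw [List.drop_eq_getElem_cons hi]
      congr 1
      rw [List.getD_eq_getElem?_getD, List.getElem?_eq_getElem hi] at hc
      exact hc
    have hpre : (seg ++ [c]) <+: xs.drop (i - seg.length) := by
      rw [hdrop, hgl]
      exact ⟨xs.drop (i + 1), by simp⟩
    exact hpre.isInfix.trans (xs.drop_suffix _).isInfix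

lemma A_iff (command : String) (segments : List String) :
    command_has_guard_segment_py command segments = true ↔ GuardHit command segments := by
  unfold command_has_guard_segment_py GuardHit
  simp only [List.any_eq_true]
  constructor
  · rintro ⟨s, hs, hcond⟩
    by_cases h : pvStripSeg s = []
    · rw [if_pos (by simpa [pvStripSeg] using h)] at hcond
      exact absurd hcond (by simp)
    · rw [if_neg (by simpa [pvStripSeg] using h)] at hcond
      refine ⟨s, hs, h, ?_⟩
      rcases Bool.or_eq_true_iff.mp hcond with h1 | h1
      · rcases Bool.or_eq_true_iff.mp h1 with h2 | h2
        · -- '/seg/' occurrence is also a 'seg/' occurrence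
          left
          have h3 := (PySem.Chars.isIn_iff_infix _ _).mp h2
          have h4 : (pvStripSeg s ++ ['/']) <:+: ['/'] ++ pvStripSeg s ++ ['/'] := by
            rw [List.append_assoc]
            exact (List.suffix_append _ _).isInfix
          exact h4.trans (by simpa [pvStripSeg] using h3)
        · exact Or.inl ((PySem.Chars.isIn_iff_infix _ _).mp h2)
      · exact Or.inr ((PySem.Chars.isIn_iff_infix _ _).mp h1)
  · rintro ⟨s, hs, h, hocc⟩
    refine ⟨s, hs, ?_⟩
    rw [if_neg (by simpa [pvStripSeg] using h)]
    rcases hocc with h1 | h1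
    · refine Bool.or_eq_true_iff.mpr (Or.inl (Bool.or_eq_true_iff.mpr (Or.inr ?_)))
      exact (PySem.Chars.isIn_iff_infix _ _).mpr h1
    · exact Bool.or_eq_true_iff.mpr (Or.inr ((PySem.Chars.isIn_iff_infix _ _).mpr h1))

lemma B_iff (command : String) (segments : List String) :
    command_has_guard_segment_py_alt command segments = true ↔ GuardHit command segments := by
  simp only [command_has_guard_segment_py_alt]
  split_ifs with hseg
  · simp only [false_iff]
    rintro ⟨s, hs, hne, _⟩
    have hmem : pvStripSeg s ∈ segments.foldl
        (fun st s => if pvStripSeg s ≠ [] then PySem.Set.add st (pvStripSeg s) else st)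
        PySem.Set.empty :=
      (mem_segs_foldl segments PySem.Set.empty (pvStripSeg s)).mpr
        (Or.inr ⟨s, hs, rfl, hne⟩)
    rw [hseg] at hmem
    exact absurd hmem (List.not_mem_nil)
  · simp only [List.any_eq_true, List.mem_range]
    constructor
    · rintro ⟨i, hi, hcond⟩
      by_cases hch : (PySem.Chars.lower command.toList).getD i ' ' = '/' ∨
          (PySem.Chars.lower command.toList).getD i ' ' = '\\'
      · rw [if_pos (by simpa using hch)] at hcond
        rcases List.any_eq_true.mp hcond with ⟨n, hnmem, hn⟩
        rcases Bool.and_eq_true_iff.mp hn with ⟨hni, hcont⟩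
        have hni : n ≤ i := of_decide_eq_true hni
        have hmem : ((PySem.Chars.lower command.toList).drop (i - n)).take n ∈
            segments.foldl
              (fun st s => if pvStripSeg s ≠ [] then PySem.Set.add st (pvStripSeg s) else st)
              PySem.Set.empty := by
          simpa [PySem.Set.contains] using hcont
        rcases (mem_segs_foldl _ _ _).mp hmem with h | ⟨s, hs, hts, htne⟩
        · exact absurd h (List.not_mem_nil)
        · refine ⟨s, hs, by rw [hts]; exact htne, ?_⟩
          have hlen : (pvStripSeg s).length = n := by
            rw [hts]
            simp only [List.length_take, List.length_drop]
            omega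
          rcases hch with hc | hc
          · exact Or.inl ((infix_snoc_iff _ _ _).mpr ⟨i, hi, hc, by omega, by rw [hlen]; exact hts.symm⟩)
          · exact Or.inr ((infix_snoc_iff _ _ _).mpr ⟨i, hi, hc, by omega, by rw [hlen]; exact hts.symm⟩)
      · rw [if_neg (by simpa using hch)] at hcond
        exact absurd hcond (by simp)
    · rintro ⟨s, hs, hne, hocc⟩
      have hsegmem : pvStripSeg s ∈ segments.foldl
          (fun st s => if pvStripSeg s ≠ [] then PySem.Set.add st (pvStripSeg s) else st)
          PySem.Set.empty :=
        (mem_segs_foldl segments PySem.Set.empty (pvStripSeg s)).mpr (Or.inr ⟨s, hs, rfl, hne⟩)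
      rcases hocc with h1 | h1
      · rcases (infix_snoc_iff _ _ _).mp h1 with ⟨i, hi, hc, hn, ht⟩
        refine ⟨i, hi, ?_⟩
        rw [if_pos (by simp only [Bool.or_eq_true, decide_eq_true_eq, - List.getD_eq_getElem?_getD]; exact Or.inl hc)]
        exact List.any_eq_true.mpr ⟨(pvStripSeg s).length,
          (PySem.Set.mem_ofList _ _).mpr (List.mem_map.mpr ⟨pvStripSeg s, hsegmem, rfl⟩),
          Bool.and_eq_true_iff.mpr ⟨decide_eq_true hn,
            by simpa [PySem.Set.contains, ht] using hsegmem⟩⟩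
      · rcases (infix_snoc_iff _ _ _).mp h1 with ⟨i, hi, hc, hn, ht⟩
        refine ⟨i, hi, ?_⟩
        rw [if_pos (by simp only [Bool.or_eq_true, decide_eq_true_eq, - List.getD_eq_getElem?_getD]; exact Or.inr hc)]
        exact List.any_eq_true.mpr ⟨(pvStripSeg s).length,
          (PySem.Set.mem_ofList _ _).mpr (List.mem_map.mpr ⟨pvStripSeg s, hsegmem, rfl⟩),
          Bool.and_eq_true_iff.mpr ⟨decide_eq_true hn,
            by simpa [PySem.Set.contains, ht] using hsegmem⟩⟩

-- ===== VERDICT (by name: the statement is the Claim_ definition above) =====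
theorem command_has_guard_segment_py_spec : Claim_equal_command_has_guard_segment_py := by
  intro command segments _
  unfold Spec_command_has_guard_segment_py
  rw [Bool.eq_iff_iff, A_iff, B_iff]
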